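-- pv_equiv track=rewrite | github.com/apiarian/ulisp-fruit-jam | tools/gen_cp437_font.py | hflip_glyph
-- ===== SOURCE A (Python) =====
-- def hflip_glyph(rows):
--     """Horizontally flip an 8-pixel-wide glyph (list of 8 ints)."""
--     flipped = []
--     for byte in rows:
--         out = 0
--         for bit in range(8):
--             if byte & (1 << bit):
--                 out |= (1 << (7 - bit))
--         flipped.append(out)
--     return flipped
-- ===== SOURCE B (Python) =====
-- def _rev8(b):
--     b %= 256
--     b = ((b & 0x0F) << 4) | (b >> 4)
--     b = ((b & 0x33) << 2) | ((b >> 2) & 0x33)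
--     b = ((b & 0x55) << 1) | ((b >> 1) & 0x55)
--     return b
--
--
-- def hflip_glyph(rows):
--     """Horizontally flip an 8-pixel-wide glyph (list of 8 ints)."""
--     return [_rev8(b) for b in rows]
-- ===== Notes on version B (the rewrite author's own statement) =====
-- stated objective: faster
-- what changed: Replaces the per-byte 8-iteration test-and-set bit loop with a branch-free 3-step swap network (nibbles, bit pairs, single bits) after reducing the byte mod 256.
import Mathlib
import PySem

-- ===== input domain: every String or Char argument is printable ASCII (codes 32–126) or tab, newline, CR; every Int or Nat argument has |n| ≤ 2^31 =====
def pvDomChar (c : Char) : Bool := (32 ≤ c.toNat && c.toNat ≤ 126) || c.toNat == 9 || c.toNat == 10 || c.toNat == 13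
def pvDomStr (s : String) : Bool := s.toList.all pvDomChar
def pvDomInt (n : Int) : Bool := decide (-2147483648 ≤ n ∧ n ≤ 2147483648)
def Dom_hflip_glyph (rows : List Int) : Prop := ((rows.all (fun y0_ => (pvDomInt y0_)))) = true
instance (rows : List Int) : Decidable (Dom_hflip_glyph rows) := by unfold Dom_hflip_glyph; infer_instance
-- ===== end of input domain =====

-- B replaces A's per-byte 8-iteration test-and-set bit loop with a branch-free
-- 3-step swap network (nibbles, bit pairs, single bits) after reducing mod 256 (objective: faster, constant-factor; measured).

-- ===== PORT A =====
-- A's inner 'for bit in range(8)' loop, named for readability (same computation, step for step)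
def pvRevA (byte : Int) : Int :=
  (List.range 8).foldl
    (fun (out : Int) (bit : Nat) =>
      if PySem.Int.band byte ((1 : Int) <<< bit) ≠ 0 then
        PySem.Int.bor out ((1 : Int) <<< (7 - bit))
      else out) 0

def hflip_glyph (rows : List Int) : List Int :=
  rows.foldl (fun flipped byte => flipped ++ [pvRevA byte]) []

-- ===== PORT B =====
def pvRev8 (b0 : Int) : Int :=
  let b := PySem.Int.mod b0 256
  let b := PySem.Int.bor ((PySem.Int.band b 15) <<< (4 : Nat)) (b >>> (4 : Nat))
  let b := PySem.Int.bor ((PySem.Int.band b 51) <<< (2 : Nat)) (PySem.Int.band (b >>> (2 : Nat)) 51)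
  PySem.Int.bor ((PySem.Int.band b 85) <<< (1 : Nat)) (PySem.Int.band (b >>> (1 : Nat)) 85)

def hflip_glyph_alt (rows : List Int) : List Int :=
  rows.map pvRev8

-- ===== PRECONDITION & SPEC =====
def Spec_hflip_glyph (rows : List Int) (out : List Int) : Prop := out = hflip_glyph_alt rows
instance (rows : List Int) (out : List Int) : Decidable (Spec_hflip_glyph rows out) := by unfold Spec_hflip_glyph; infer_instance

-- ===== CLAIM (what is proved, stated in full; the proofs are below) =====
def Claim_equal_hflip_glyph : Prop := ∀ (rows : List Int), Dom_hflip_glyph rows → Spec_hflip_glyph rows (hflip_glyph rows)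

-- ===== LEMMAS AND PROOFS =====

-- A's append-accumulator loop is a map.
theorem pv_foldl_append_map (rows : List Int) (init : List Int) :
    rows.foldl (fun flipped byte => flipped ++ [pvRevA byte]) init = init ++ rows.map pvRevA := by
  induction rows generalizing init with
  | nil => simp
  | cons x xs ih => simp [List.foldl, ih]

-- subtracting from 255 complements the low 8 bits
theorem pv_testbit_flip : ∀ x : Fin 256, ∀ k : Fin 8,
    (255 - x.val).testBit k.val = !x.val.testBit k.val := by
  set_option maxRecDepth 100000 in decide

-- masking with a single low bit only sees the byte's residue mod 256
theorem pv_band_mod (b : Int) (k : Nat) (hk : k < 8) :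
    PySem.Int.band b ((1 : Int) <<< k) = PySem.Int.band (b % 256) ((1 : Int) <<< k) := by
  have hM : ((1 : Int) <<< k) = ((2 ^ k : Nat) : Int) := by
    rw [Int.shiftLeft_eq]; push_cast; ring
  rcases le_or_gt 0 b with hb | hb
  · have h2 : (0 : Int) ≤ ((2 ^ k : Nat) : Int) := by positivity
    have hr : b % 256 = ((b.toNat % 256 : Nat) : Int) := by omega
    rw [hM, hr, PySem.Int.band_of_nonneg hb h2,
      PySem.Int.band_of_nonneg (by positivity) h2]
    have : (256 : Nat) = 2 ^ 8 := by norm_num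
    simp only [Int.toNat_natCast]
    congr 1
    rw [this, Nat.and_two_pow, Nat.and_two_pow, Nat.testBit_mod_two_pow]
    simp [hk]
  · set m : Nat := (-b - 1).toNat with hm
    have hbm : b = -(m : Int) - 1 := by omega
    have hr : b % 256 = ((255 - m % 256 : Nat) : Int) := by omega
    have h2 : (0 : Int) ≤ ((2 ^ k : Nat) : Int) := by positivity
    have hlhs : PySem.Int.band b ((2 ^ k : Nat) : Int)
        = ((2 ^ k - (2 ^ k &&& m) : Nat) : Int) := by
      unfold PySem.Int.band
      rw [if_neg (by omega), if_pos h2, Int.toNat_natCast, ← hm]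
    rw [hM, hlhs, hr, PySem.Int.band_of_nonneg (by positivity) h2]
    simp only [Int.toNat_natCast]
    congr 1
    have hx : m % 256 < 256 := Nat.mod_lt _ (by norm_num)
    have hmk : m.testBit k = (m % 256).testBit k := by
      have : (256 : Nat) = 2 ^ 8 := by norm_num
      rw [this, Nat.testBit_mod_two_pow]
      simp [hk]
    have hflip := pv_testbit_flip ⟨m % 256, hx⟩ ⟨k, hk⟩
    rw [Nat.and_comm, Nat.and_two_pow, Nat.and_two_pow, hmk, hflip]
    cases h : (m % 256).testBit k <;> simp

-- A's per-byte value only depends on the byte mod 256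
theorem pv_revA_mod (b : Int) : pvRevA b = pvRevA (b % 256) := by
  unfold pvRevA
  have h : List.range 8 = [0, 1, 2, 3, 4, 5, 6, 7] := by decide
  rw [h]
  simp only [List.foldl_cons, List.foldl_nil]
  rw [pv_band_mod b 0 (by norm_num), pv_band_mod b 1 (by norm_num),
    pv_band_mod b 2 (by norm_num), pv_band_mod b 3 (by norm_num),
    pv_band_mod b 4 (by norm_num), pv_band_mod b 5 (by norm_num),
    pv_band_mod b 6 (by norm_num), pv_band_mod b 7 (by norm_num)]

-- B's per-byte value only depends on the byte mod 256
theorem pv_rev8_mod (b : Int) : pvRev8 b = pvRev8 (b % 256) := by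
  unfold pvRev8
  have : PySem.Int.mod (b % 256) 256 = PySem.Int.mod b 256 := by
    rw [PySem.Int.mod_eq_emod_of_pos (by norm_num), PySem.Int.mod_eq_emod_of_pos (by norm_num)]
    exact Int.emod_emod_of_dvd b dvd_rfl
  rw [this]

-- the two per-byte computations agree on all 256 residues
theorem pv_core : ∀ r : Fin 256, pvRevA (r.val : Int) = pvRev8 (r.val : Int) := by
  set_option maxRecDepth 100000 in decide

theorem pv_byte (b : Int) : pvRevA b = pvRev8 b := by
  have h0 : (0 : Int) ≤ b % 256 := Int.emod_nonneg b (by norm_num)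
  have h1 : b % 256 < 256 := Int.emod_lt_of_pos b (by norm_num)
  have hr : b % 256 = (((b % 256).toNat : Nat) : Int) := by omega
  have hlt : (b % 256).toNat < 256 := by omega
  have := pv_core ⟨(b % 256).toNat, hlt⟩
  rw [pv_revA_mod, pv_rev8_mod, hr]
  exact this

-- ===== VERDICT (by name: the statement is the Claim_ definition above) =====
theorem hflip_glyph_spec : Claim_equal_hflip_glyph := by
  intro rows _
  show hflip_glyph rows = hflip_glyph_alt rows
  rw [hflip_glyph, pv_foldl_append_map, List.nil_append]
  show rows.map pvRevA = rows.map pvRev8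
  rw [funext pv_byte]
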